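-- pv_equiv track=rewrite | github.com/hscspring/The-DataStructure-and-Algorithms | CodingInterview2-Python/38_StringPermutation☆/string_permutation.py | permutate_core2
-- ===== SOURCE A (Python) =====
-- def permutate_core2(s: str, moves: list, res: list) -> list:
--     for i in range(len(s)):
--         remain = s[0:i] + s[i+1:]
--         moves.append(s[i])
--         if remain:
--             permutate_core2(remain, moves, res)
--         else:
--             res.append("".join(moves))
--         moves.pop()
--     return res
-- ===== SOURCE B (Python) =====
-- def permutate_core2(s: str, moves: list, res: list) -> list:
--     # Iterative breadth-first frontier instead of recursion; does not touch moves
--     # (the original restores moves to its initial state anyway). Mutates res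
--     # in place like the original.
--     if s:
--         frontier = [("".join(moves), s)]
--         for _ in range(len(s)):
--             frontier = [(built + rest[i], rest[:i] + rest[i + 1:])
--                         for (built, rest) in frontier
--                         for i in range(len(rest))]
--         res.extend(built for (built, _) in frontier)
--     return res
-- ===== Notes on version B (the rewrite author's own statement) =====
-- stated objective: alternative
-- what changed: Replaces A's depth-first recursion that mutates a shared moves stack with an iterative breadth-first frontier of (built, remaining) pairs, expanded len(s) times by a comprehension; moves is never touched (A restores it anyway) and res is extended once at the end.
import Mathlib
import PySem

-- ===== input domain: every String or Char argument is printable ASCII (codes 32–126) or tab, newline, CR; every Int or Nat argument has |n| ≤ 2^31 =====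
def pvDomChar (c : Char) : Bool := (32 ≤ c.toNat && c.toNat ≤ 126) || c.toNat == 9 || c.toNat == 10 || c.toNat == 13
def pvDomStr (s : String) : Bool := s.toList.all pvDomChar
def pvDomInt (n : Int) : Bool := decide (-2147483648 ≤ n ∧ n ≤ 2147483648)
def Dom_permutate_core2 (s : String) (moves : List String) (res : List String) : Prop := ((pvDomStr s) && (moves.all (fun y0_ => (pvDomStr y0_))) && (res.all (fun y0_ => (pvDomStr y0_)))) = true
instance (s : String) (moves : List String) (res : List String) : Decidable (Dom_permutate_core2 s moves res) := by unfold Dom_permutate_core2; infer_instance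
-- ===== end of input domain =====

-- B replaces A's depth-first recursion (which threads a mutable `moves` stack) by an
-- iterative breadth-first frontier of (built, remaining) pairs; same return value.
-- Side effects: A pushes/pops `moves` (net unchanged) and appends to `res`; B never
-- touches `moves` and extends `res`; the equivalence proved here is about the return value.

-- ===== PORT A =====
-- strings are handled as their List Char (exact for slices s[0:i]+s[i+1:] = take/drop
-- with nonnegative in-range bounds; s[i] with i < len is getD).
-- The loop `for i in range(len(s))` with a recursive call inside becomes recursion on
-- the pair (length s, remaining indices); `moves.append`/`moves.pop` around each body
-- means the body runs with moves ++ [s[i]] and the next iteration with moves again.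
def permAIdx (s : List Char) (moves : List String) (res : List String) (i : Nat) : List String :=
  if h : i < s.length then
    -- remain := s.take i ++ s.drop (i+1); moves' := moves ++ [s[i]] (popped again after the body);
    -- res' is res after this iteration's body; then the loop continues at i+1
    permAIdx s moves
      (if s.take i ++ s.drop (i + 1) ≠ [] then
        permAIdx (s.take i ++ s.drop (i + 1)) (moves ++ [String.ofList [s.getD i ' ']]) res 0
      else res ++ [PySem.Str.join "" (moves ++ [String.ofList [s.getD i ' ']])])
      (i + 1)
  else res
termination_by (s.length, s.length - i)
decreasing_by
  · have : (s.take i ++ s.drop (i + 1)).length = s.length - 1 := by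
      simp; omega
    left; omega
  · right; omega

def permutate_core2 (s : String) (moves : List String) (res : List String) : List String :=
  permAIdx s.toList moves res 0

-- ===== PORT B =====
-- the Python strings `built` are handled as List Char (string + is list append).
def stepB (frontier : List (List Char × List Char)) : List (List Char × List Char) :=
  frontier.flatMap (fun br =>
    (List.range br.2.length).map (fun i =>
      (br.1 ++ [br.2.getD i ' '], br.2.take i ++ br.2.drop (i + 1))))

def iterB : Nat → List (List Char × List Char) → List (List Char × List Char)
  | 0, f => f
  | n + 1, f => iterB n (stepB f)

def permutate_core2_alt (s : String) (moves : List String) (res : List String) : List String :=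
  if s.toList.isEmpty then res
  else
    let frontier := iterB s.toList.length [((PySem.Str.join "" moves).toList, s.toList)]
    res ++ frontier.map (fun br => String.ofList br.1)

-- ===== PRECONDITION & SPEC =====
def Spec_permutate_core2 (s : String) (moves : List String) (res : List String) (out : List String) : Prop := out = permutate_core2_alt s moves res
instance (s : String) (moves : List String) (res : List String) (out : List String) : Decidable (Spec_permutate_core2 s moves res out) := by unfold Spec_permutate_core2; infer_instance

-- ===== CLAIM (what is proved, stated in full; the proofs are below) =====
def Claim_equal_permutate_core2 : Prop := ∀ (s : String) (moves : List String) (res : List String), Dom_permutate_core2 s moves res → Spec_permutate_core2 s moves res (permutate_core2 s moves res)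

-- ===== LEMMAS AND PROOFS =====

lemma chars_join_nil (parts : List (List Char)) :
    PySem.Chars.join [] parts = parts.flatten := by
  induction parts with
  | nil => simp [PySem.Chars.join_nil]
  | cons x t ih =>
      cases t with
      | nil => simp [PySem.Chars.join_singleton]
      | cons y t2 =>
          rw [PySem.Chars.join_cons_cons, ih]
          simp

lemma join_push (moves : List String) (c : Char) :
    (PySem.Str.join "" (moves ++ [String.ofList [c]])).toList
      = (PySem.Str.join "" moves).toList ++ [c] := by
  simp [PySem.Str.toList_join, chars_join_nil]

lemma stepB_append (a b : List (List Char × List Char)) :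
    stepB (a ++ b) = stepB a ++ stepB b := by
  simp [stepB]

lemma iterB_nil (n : Nat) : iterB n [] = [] := by
  induction n with
  | zero => rfl
  | succ n ih => simpa [iterB, stepB] using ih

lemma iterB_append (n : Nat) (a b : List (List Char × List Char)) :
    iterB n (a ++ b) = iterB n a ++ iterB n b := by
  induction n generalizing a b with
  | zero => rfl
  | succ n ih => simp [iterB, stepB_append, ih]

lemma iterB_flatMap (n : Nat) (l : List (List Char × List Char)) :
    iterB n l = l.flatMap (fun br => iterB n [br]) := by
  induction l with
  | nil => simp [iterB_nil]
  | cons x t ih =>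
      have : x :: t = [x] ++ t := rfl
      rw [this, iterB_append, ih]; simp

lemma eraseIdx_as_take_drop (s : List Char) (i : Nat) :
    s.take i ++ s.drop (i + 1) = s.eraseIdx i := by
  rw [List.eraseIdx_eq_take_drop_succ]

-- the A loop from index i, with k iterations left, produces exactly the B subtrees
-- rooted at each remaining choice of first character
lemma loopA (n : Nat)
    (IH : ∀ m, m < n → ∀ s : List Char, ∀ moves res, s.length = m → s ≠ [] →
      permAIdx s moves res 0
        = res ++ (iterB m [((PySem.Str.join "" moves).toList, s)]).map
            (fun br => String.ofList br.1))
    (s : List Char) (hs : s.length = n) :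
    ∀ k i moves res, i + k = n →
      permAIdx s moves res i
        = res ++ (List.range' i k).flatMap (fun j =>
            (iterB (n - 1) [((PySem.Str.join "" moves).toList ++ [s.getD j ' '],
                             s.eraseIdx j)]).map (fun br => String.ofList br.1)) := by
  intro k
  induction k with
  | zero =>
      intro i moves res hik
      rw [permAIdx]
      simp [hs, hik.symm]
  | succ k ihk =>
      intro i moves res hik
      have hi : i < s.length := by omega
      rw [permAIdx, dif_pos hi]
      have hrem : s.take i ++ s.drop (i + 1) = s.eraseIdx i := eraseIdx_as_take_drop s i
      have hremlen : (s.eraseIdx i).length = n - 1 := by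
        rw [List.length_eraseIdx_of_lt hi]; omega
      have hcontrib :
          (if s.take i ++ s.drop (i + 1) ≠ [] then
              permAIdx (s.take i ++ s.drop (i + 1))
                (moves ++ [String.ofList [s.getD i ' ']]) res 0
            else res ++ [PySem.Str.join "" (moves ++ [String.ofList [s.getD i ' ']])])
          = res ++ (iterB (n - 1) [((PySem.Str.join "" moves).toList ++ [s.getD i ' '],
                          s.eraseIdx i)]).map (fun br => String.ofList br.1) := by
        rw [hrem]
        by_cases hne : s.eraseIdx i = []
        · have hn1 : n - 1 = 0 := by
            rw [hne] at hremlen; simpa using hremlen.symm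
          rw [if_neg (by simp [hne]), hne, hn1]
          have hj : PySem.Str.join "" (moves ++ [String.ofList [s.getD i ' ']])
              = String.ofList ((PySem.Str.join "" moves).toList ++ [s.getD i ' ']) := by
            rw [← join_push]
            exact String.ofList_toList.symm
          rw [hj]
          simp [iterB]
        · rw [if_pos hne]
          rw [IH (n - 1) (by omega) _ _ _ hremlen hne, join_push]
      rw [hcontrib, ihk (i + 1) moves _ (by omega)]
      rw [List.range'_succ, List.flatMap_cons]
      simp

-- main induction: A's DFS from the root equals B's fully-expanded frontier
lemma mainAB : ∀ n : Nat, ∀ s : List Char, ∀ moves res, s.length = n → s ≠ [] →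
    permAIdx s moves res 0
      = res ++ (iterB n [((PySem.Str.join "" moves).toList, s)]).map
          (fun br => String.ofList br.1) := by
  intro n
  induction n using Nat.strong_induction_on with
  | _ n IH =>
    intro s moves res hs hne
    obtain ⟨m, rfl⟩ : ∃ m, n = m + 1 := by
      refine ⟨n - 1, ?_⟩
      have : 0 < s.length := List.length_pos_iff.mpr hne
      omega
    have hloop := loopA (m + 1) (fun m' hm' => IH m' hm') s hs (m + 1) 0 moves res (by omega)
    rw [hloop]
    have hstep : stepB [((PySem.Str.join "" moves).toList, s)]
        = (List.range (m + 1)).map (fun j =>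
            ((PySem.Str.join "" moves).toList ++ [s.getD j ' '], s.eraseIdx j)) := by
      simp [stepB, hs]
      exact fun j hj => eraseIdx_as_take_drop s j
    rw [show iterB (m + 1) [((PySem.Str.join "" moves).toList, s)]
          = iterB m (stepB [((PySem.Str.join "" moves).toList, s)]) from rfl,
        hstep, iterB_flatMap]
    simp [List.range_eq_range', List.flatMap_map, List.map_flatMap]

-- ===== VERDICT (by name: the statement is the Claim_ definition above) =====
theorem permutate_core2_spec : Claim_equal_permutate_core2 := by
  intro s moves res _
  unfold Spec_permutate_core2 permutate_core2 permutate_core2_alt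
  by_cases hne : s.toList = []
  · rw [permAIdx]
    simp [hne]
  · rw [if_neg (by simpa using hne)]
    exact mainAB s.toList.length s.toList moves res rfl hne
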